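-- pv_equiv track=rewrite | github.com/shu030929/pgus-study | 프로그래머스/0/181931. 등차수열의 특정한 항만 더하기/등차수열의 특정한 항만 더하기.py | solution
-- ===== SOURCE A (Python) =====
-- def solution(a, d, included):
--     answer = 0
--
--     for i in range(len(included)):
--
--         if included[i] == True and answer == 0:
--             answer += (a + (d)*i)
--
--
--         elif included[i] == True and answer != 0:
--             answer += (a + (d)*i)
--
--
--
--     return answer
-- ===== SOURCE B (Python) =====
-- def solution(a, d, included):
--     # stage 1: materialize the whole arithmetic sequence up front
--     terms = []
--     t = a
--     for _ in included:
--         terms.append(t)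
--         t += d
--     # stage 2: sum the materialized terms standing at included positions
--     return sum(t for t, inc in zip(terms, included) if inc == True)
-- ===== Notes on version B (the rewrite author's own statement) =====
-- stated objective: alternative
-- what changed: B replaces A's single indexed accumulation loop by two staged passes: it first materializes the whole arithmetic sequence as a list, then sums the materialized terms at included positions via zip+filter, with no index arithmetic and no accumulator branching.
import Mathlib
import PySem

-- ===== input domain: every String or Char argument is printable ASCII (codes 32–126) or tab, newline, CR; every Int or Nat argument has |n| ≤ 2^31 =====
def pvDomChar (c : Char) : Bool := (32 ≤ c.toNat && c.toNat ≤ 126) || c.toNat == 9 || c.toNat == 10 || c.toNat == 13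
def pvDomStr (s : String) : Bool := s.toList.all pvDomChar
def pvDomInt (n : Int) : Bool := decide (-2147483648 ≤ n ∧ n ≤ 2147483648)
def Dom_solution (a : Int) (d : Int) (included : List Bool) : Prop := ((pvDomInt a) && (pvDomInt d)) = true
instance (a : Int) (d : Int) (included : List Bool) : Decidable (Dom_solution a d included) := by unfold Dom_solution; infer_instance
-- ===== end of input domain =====

-- B replaces A's indexed per-term accumulation (with its redundant answer==0 branch split) by two
-- staged passes: materialize the arithmetic sequence as a list, then sum the terms at included
-- positions via zip + filter (objective: alternative decomposition, same cost).

-- ===== PORT A =====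
-- for i in range(len(included)): two branches, both adding a + d*i when included[i] == True.
-- index i is always in range, so pyGetD's default is never used.
def solution (a : Int) (d : Int) (included : List Bool) : Int :=
  (PySem.List.pyRange 0 (included.length : Int) 1).foldl
    (fun answer i =>
      if PySem.List.pyGetD included i false && answer == 0 then answer + (a + d * i)
      else if PySem.List.pyGetD included i false && !(answer == 0) then answer + (a + d * i)
      else answer) 0

-- ===== PORT B =====
-- stage 1: foldl building (terms, t) as Source B's loop appending t and stepping t += d;
-- stage 2: sum(t for t, inc in zip(terms, included) if inc == True).
def solution_alt (a : Int) (d : Int) (included : List Bool) : Int :=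
  let st := included.foldl
    (fun (p : List Int × Int) (_ : Bool) => (p.1 ++ [p.2], p.2 + d)) (([] : List Int), a)
  ((((st.1.zip included).filter (fun e => e.2)).map (fun e => e.1)).sum)

-- ===== PRECONDITION & SPEC =====
def Spec_solution (a : Int) (d : Int) (included : List Bool) (out : Int) : Prop := out = solution_alt a d included
instance (a : Int) (d : Int) (included : List Bool) (out : Int) : Decidable (Spec_solution a d included out) := by unfold Spec_solution; infer_instance

-- ===== CLAIM (what is proved, stated in full; the proofs are below) =====
def Claim_equal_solution : Prop := ∀ (a : Int) (d : Int) (included : List Bool), Dom_solution a d included → Spec_solution a d included (solution a d included)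

-- ===== LEMMAS AND PROOFS =====

-- reference: the sum of the included terms of the arithmetic sequence starting at t with step d
def gref (d : Int) : Int → List Bool → Int
  | _, [] => 0
  | t, b :: ys => (if b then t else 0) + gref d (t + d) ys

-- the terms list Source B's first stage builds
def termsList (d : Int) : Int → List Bool → List Int
  | _, [] => []
  | t, _ :: ys => t :: termsList d (t + d) ys

-- A's two branches add the same term, so its body is 'if included[i] then add else keep'.
lemma bodyA_eq (a d : Int) (b : Bool) (answer i : Int) :
    (if b && answer == 0 then answer + (a + d * i)
     else if b && !(answer == 0) then answer + (a + d * i)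
     else answer)
    = (if b then answer + (a + d * i) else answer) := by
  cases b <;> by_cases h : answer = 0 <;> simp [h]

-- A's simplified fold over enumerate computes the reference sum
lemma keyA (a d : Int) (xs : List Bool) : ∀ (s acc : Int),
    (PySem.List.enumerate xs s).foldl
      (fun answer (e : Int × Bool) => if e.2 then answer + (a + d * e.1) else answer) acc
    = acc + gref d (a + d * s) xs := by
  induction xs with
  | nil => intro s acc; simp [PySem.List.enumerate_nil, gref]
  | cons b ys ih =>
    intro s acc
    rw [PySem.List.enumerate_cons]
    have hs : a + d * (s + 1) = (a + d * s) + d := by ring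
    cases b
    · simpa [gref, hs] using ih (s + 1) acc
    · simpa [gref, hs, add_assoc] using ih (s + 1) (acc + (a + d * s))

-- stage 1 of B builds termsList
lemma stage1_eq (d : Int) (xs : List Bool) : ∀ (t : Int) (acc : List Int),
    (xs.foldl (fun (p : List Int × Int) (_ : Bool) => (p.1 ++ [p.2], p.2 + d)) (acc, t)).1
    = acc ++ termsList d t xs := by
  induction xs with
  | nil => intro t acc; simp [termsList]
  | cons b ys ih =>
    intro t acc
    simp only [List.foldl_cons]
    rw [ih (t + d) (acc ++ [t])]
    simp [termsList]

-- stage 2 of B computes the reference sum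
lemma stage2_eq (d : Int) (xs : List Bool) : ∀ (t : Int),
    ((((termsList d t xs).zip xs).filter (fun e => e.2)).map (fun e => e.1)).sum
    = gref d t xs := by
  induction xs with
  | nil => intro t; simp [termsList, gref]
  | cons b ys ih =>
    intro t
    cases b <;> simp [termsList, gref, ih (t + d)]

-- ===== VERDICT (by name: the statement is the Claim_ definition above) =====
theorem solution_spec : Claim_equal_solution := by
  intro a d included _
  show solution a d included = solution_alt a d included
  unfold solution solution_alt
  have hb : (fun (answer : Int) (i : Int) =>
      if PySem.List.pyGetD included i false && answer == 0 then answer + (a + d * i)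
      else if PySem.List.pyGetD included i false && !(answer == 0) then answer + (a + d * i)
      else answer)
    = (fun (answer : Int) (i : Int) =>
      if PySem.List.pyGetD included i false then answer + (a + d * i) else answer) := by
    funext answer i
    exact bodyA_eq a d (PySem.List.pyGetD included i false) answer i
  rw [hb]
  have h2 : List.foldl (fun (answer : Int) (i : Int) =>
        if PySem.List.pyGetD included i false then answer + (a + d * i) else answer) 0
        (PySem.List.pyRange 0 (PySem.List.len included) 1)
      = List.foldl (fun (answer : Int) (e : Int × Bool) =>
        if e.2 then answer + (a + d * e.1) else answer) 0 (PySem.List.enumerate included 0) := by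
    rw [PySem.List.enumerate_eq_map_pyRange included false, List.foldl_map]
  simp only [PySem.List.len_eq] at h2
  rw [h2, keyA a d included 0 0]
  show 0 + gref d (a + d * 0) included =
    ((((included.foldl (fun (p : List Int × Int) (_ : Bool) => (p.1 ++ [p.2], p.2 + d))
        (([] : List Int), a)).1.zip included).filter (fun e => e.2)).map (fun e => e.1)).sum
  rw [stage1_eq d included a [], List.nil_append, stage2_eq d included a]
  simp
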